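-- pv_equiv track=rewrite | github.com/ckumar1162/mnk-trainee | Python/MNK-Trainee-Manoj_Kumar/W3schools/lists/advanced/union_intersection.py | union_and_intersection
-- ===== SOURCE A (Python) =====
-- def union_and_intersection(lst1, lst2):
--     union = []
--     intersection = []
--     seen = set()
--     for item in lst1 + lst2:
--         if item not in union:
--             union.append(item)
--     for item in lst1:
--         if item in lst2 and item not in seen:
--             intersection.append(item)
--             seen.add(item)
--     return union, intersection
-- ===== SOURCE B (Python) =====
-- def union_and_intersection(lst1, lst2):
--     # one-pass union with a seen-set, then derive the intersection by
--     # scanning the union (instead of re-scanning lst1 as A does)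
--     union = []
--     seen = set()
--     for item in lst1 + lst2:
--         if item not in seen:
--             seen.add(item)
--             union.append(item)
--     set2 = set(lst2)
--     intersection = [x for x in union if x in lst1 and x in set2]
--     return union, intersection
-- ===== Notes on version B (the rewrite author's own statement) =====
-- stated objective: alternative
-- what changed: B builds the union in a single pass with a seen-set (replacing A's membership test on the growing union list) and derives the intersection by filtering the already-built union against lst1 and set(lst2), instead of A's second independent scan of lst1 with its own seen-set.
import Mathlib
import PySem

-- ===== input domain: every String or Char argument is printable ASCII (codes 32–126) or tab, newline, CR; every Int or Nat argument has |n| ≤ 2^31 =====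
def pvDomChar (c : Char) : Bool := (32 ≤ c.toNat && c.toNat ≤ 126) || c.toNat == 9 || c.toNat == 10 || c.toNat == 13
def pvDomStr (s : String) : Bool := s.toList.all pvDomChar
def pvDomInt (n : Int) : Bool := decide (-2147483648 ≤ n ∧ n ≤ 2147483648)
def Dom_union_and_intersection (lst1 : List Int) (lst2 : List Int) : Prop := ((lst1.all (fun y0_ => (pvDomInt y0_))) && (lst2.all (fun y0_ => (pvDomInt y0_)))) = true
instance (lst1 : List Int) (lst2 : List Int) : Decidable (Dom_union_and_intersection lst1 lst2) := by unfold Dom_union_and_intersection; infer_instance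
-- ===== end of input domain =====

-- B builds the union in one pass with a seen-set and DERIVES the intersection by
-- filtering the union, instead of A's second independent scan of lst1 (objective: alternative).

-- ===== PORT A =====
def union_and_intersection (lst1 : List Int) (lst2 : List Int) : List Int × List Int :=
  -- for item in lst1 + lst2: if item not in union: union.append(item)
  let union := (lst1 ++ lst2).foldl (fun u item => if item ∈ u then u else u ++ [item]) []
  -- for item in lst1: if item in lst2 and item not in seen: append + add
  let p := lst1.foldl (fun (p : List Int × PySem.Set Int) item =>
      if item ∈ lst2 ∧ item ∉ p.2 then (p.1 ++ [item], PySem.Set.add p.2 item) else p)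
    ([], PySem.Set.empty)
  (union, p.1)

-- ===== PORT B =====
def union_and_intersection_alt (lst1 : List Int) (lst2 : List Int) : List Int × List Int :=
  -- for item in lst1 + lst2: if item not in seen: seen.add(item); union.append(item)
  let p := (lst1 ++ lst2).foldl (fun (p : List Int × PySem.Set Int) item =>
      if item ∈ p.2 then p else (p.1 ++ [item], PySem.Set.add p.2 item))
    ([], PySem.Set.empty)
  let set2 : PySem.Set Int := PySem.Set.ofList lst2
  (p.1, p.1.filter (fun x => decide (x ∈ lst1) && decide (x ∈ set2)))

-- ===== PRECONDITION & SPEC =====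
def Spec_union_and_intersection (lst1 : List Int) (lst2 : List Int) (out : List Int × List Int) : Prop := out = union_and_intersection_alt lst1 lst2
instance (lst1 : List Int) (lst2 : List Int) (out : List Int × List Int) : Decidable (Spec_union_and_intersection lst1 lst2 out) := by unfold Spec_union_and_intersection; infer_instance

-- ===== CLAIM (what is proved, stated in full; the proofs are below) =====
def Claim_equal_union_and_intersection : Prop := ∀ (lst1 : List Int) (lst2 : List Int), Dom_union_and_intersection lst1 lst2 → Spec_union_and_intersection lst1 lst2 (union_and_intersection lst1 lst2)

-- ===== LEMMAS AND PROOFS =====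

-- first-occurrence dedup of a list relative to an already-seen list
def pvDf (s : List Int) : List Int → List Int
  | [] => []
  | x :: xs => if x ∈ s then pvDf s xs else x :: pvDf (s ++ [x]) xs

theorem pvMem_df (s : List Int) (l : List Int) (y : Int) :
    y ∈ pvDf s l ↔ y ∈ l ∧ y ∉ s := by
  induction l generalizing s with
  | nil => simp [pvDf]
  | cons x xs ih =>
    by_cases hx : x ∈ s
    · simp only [pvDf, if_pos hx, ih]
      constructor
      · rintro ⟨h1, h2⟩; exact ⟨List.mem_cons_of_mem _ h1, h2⟩
      · rintro ⟨h1, h2⟩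
        rcases List.mem_cons.mp h1 with rfl | h1
        · exact absurd hx h2
        · exact ⟨h1, h2⟩
    · simp only [pvDf, if_neg hx, List.mem_cons, ih, List.mem_append]
      constructor
      · rintro (rfl | ⟨h1, h2⟩)
        · exact ⟨Or.inl rfl, hx⟩
        · exact ⟨Or.inr h1, fun h => h2 (Or.inl h)⟩
      · rintro ⟨rfl | h1, h2⟩
        · exact Or.inl rfl
        · by_cases hyx : y = x
          · exact Or.inl hyx
          · refine Or.inr ⟨h1, ?_⟩
            rintro (h | h)
            · exact h2 h
            · simp at h; exact hyx h

-- A's union loop equals seen-relative dedup appended to the accumulator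
theorem pvFoldA_union (l : List Int) (u : List Int) :
    l.foldl (fun u item => if item ∈ u then u else u ++ [item]) u = u ++ pvDf u l := by
  induction l generalizing u with
  | nil => simp [pvDf]
  | cons x xs ih =>
    by_cases hx : x ∈ u
    · simp [pvDf, hx, ih]
    · simp only [List.foldl_cons, if_neg hx, pvDf, ih]
      simp

-- B's union loop equals the same dedup, given seen ≡ accumulated union
theorem pvFoldB_union (l : List Int) (u : List Int) (s : PySem.Set Int)
    (h : ∀ x : Int, x ∈ u ↔ x ∈ s) :
    (l.foldl (fun (p : List Int × PySem.Set Int) item =>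
        if item ∈ p.2 then p else (p.1 ++ [item], PySem.Set.add p.2 item)) (u, s)).1
      = u ++ pvDf s l := by
  induction l generalizing u s with
  | nil => simp [pvDf]
  | cons x xs ih =>
    by_cases hx : x ∈ s
    · simp only [List.foldl_cons, if_pos hx, pvDf]
      exact ih u s h
    · simp only [List.foldl_cons, if_neg hx, pvDf]
      have hadd : PySem.Set.add s x = s ++ [x] := by
        simp [PySem.Set.add, PySem.Set.contains]
        intro hc; exact absurd hc hx
      rw [hadd, ih (u ++ [x]) (s ++ [x])
        (by intro y; simp [List.mem_append, h y])]
      simp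
  
-- filtering a dedup only depends on seen-membership of elements the filter keeps
theorem pvDf_filter_congr (p : Int → Bool) (l : List Int) (s₁ s₂ : List Int)
    (h : ∀ y : Int, p y = true → (y ∈ s₁ ↔ y ∈ s₂)) :
    (pvDf s₁ l).filter p = (pvDf s₂ l).filter p := by
  induction l generalizing s₁ s₂ with
  | nil => simp [pvDf]
  | cons x xs ih =>
    by_cases hp : p x = true
    · by_cases h1 : x ∈ s₁
      · have h2 : x ∈ s₂ := (h x hp).mp h1
        simp only [pvDf, if_pos h1, if_pos h2]
        exact ih s₁ s₂ h
      · have h2 : x ∉ s₂ := fun hh => h1 ((h x hp).mpr hh)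
        simp only [pvDf, if_neg h1, if_neg h2, List.filter_cons, hp]
        rw [ih (s₁ ++ [x]) (s₂ ++ [x])
          (by intro y hy; simp [List.mem_append, h y hy])]
    · have hpx : p x = false := by simpa using hp
      by_cases h1 : x ∈ s₁ <;> by_cases h2 : x ∈ s₂
      · simp only [pvDf, if_pos h1, if_pos h2]; exact ih s₁ s₂ h
      · simp only [pvDf, if_pos h1, if_neg h2, List.filter_cons, hpx]
        exact ih s₁ (s₂ ++ [x]) (by
          intro y hy; constructor
          · intro hm; exact List.mem_append.mpr (Or.inl ((h y hy).mp hm))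
          · intro hm
            rcases List.mem_append.mp hm with hm | hm
            · exact (h y hy).mpr hm
            · simp at hm; subst hm; simp_all)
      · simp only [pvDf, if_neg h1, if_pos h2, List.filter_cons, hpx]
        exact ih (s₁ ++ [x]) s₂ (by
          intro y hy; constructor
          · intro hm
            rcases List.mem_append.mp hm with hm | hm
            · exact (h y hy).mp hm
            · simp at hm; subst hm; simp_all
          · intro hm; exact List.mem_append.mpr (Or.inl ((h y hy).mpr hm)))
      · simp only [pvDf, if_neg h1, if_neg h2, List.filter_cons, hpx]
        exact ih (s₁ ++ [x]) (s₂ ++ [x]) (by intro y hy; simp [List.mem_append, h y hy])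

-- A's intersection loop equals filtering the lst1-dedup by membership in lst2
theorem pvFoldA_inter (lst2 : List Int) (l : List Int) (acc : List Int) (s : PySem.Set Int) :
    (l.foldl (fun (p : List Int × PySem.Set Int) item =>
        if item ∈ lst2 ∧ item ∉ p.2 then (p.1 ++ [item], PySem.Set.add p.2 item) else p)
      (acc, s)).1
      = acc ++ (pvDf s l).filter (fun x => decide (x ∈ lst2)) := by
  induction l generalizing acc s with
  | nil => simp [pvDf]
  | cons x xs ih =>
    by_cases hs : x ∈ s
    · have : ¬ (x ∈ lst2 ∧ x ∉ s) := by tauto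
      simp only [List.foldl_cons, if_neg this, pvDf, if_pos hs]
      exact ih acc s
    · by_cases h2 : x ∈ lst2
      · have hc : x ∈ lst2 ∧ x ∉ s := ⟨h2, hs⟩
        simp only [List.foldl_cons, if_pos hc, pvDf, if_neg hs, List.filter_cons]
        have hadd : PySem.Set.add s x = s ++ [x] := by
          simp [PySem.Set.add, PySem.Set.contains]
          intro hcc; exact absurd hcc hs
        rw [hadd, ih (acc ++ [x]) (s ++ [x])]
        simp [h2]
      · have : ¬ (x ∈ lst2 ∧ x ∉ s) := by tauto
        simp only [List.foldl_cons, if_neg this, pvDf, if_neg hs, List.filter_cons]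
        rw [if_neg (by simp [h2])]
        rw [ih acc s, pvDf_filter_congr (fun x => decide (x ∈ lst2)) xs s (s ++ [x])
          (by intro y hy
              simp at hy
              simp [List.mem_append]
              intro hyx; subst hyx; exact absurd hy h2)]

-- dedup distributes over append, the seen set growing by the first part's dedup
theorem pvDf_append (a b : List Int) (s : List Int) :
    pvDf s (a ++ b) = pvDf s a ++ pvDf (s ++ pvDf s a) b := by
  induction a generalizing s with
  | nil => simp [pvDf]
  | cons x xs ih =>
    by_cases hx : x ∈ s
    · simp only [List.cons_append, pvDf, if_pos hx]
      exact ih s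
    · simp only [List.cons_append, pvDf, if_neg hx, ih (s ++ [x])]
      simp

theorem union_and_intersection_eq (lst1 lst2 : List Int) :
    union_and_intersection lst1 lst2 = union_and_intersection_alt lst1 lst2 := by
  simp only [union_and_intersection, union_and_intersection_alt, PySem.Set.empty]
  rw [pvFoldA_union (lst1 ++ lst2) [],
      pvFoldB_union (lst1 ++ lst2) [] [] (by intro x; simp),
      pvFoldA_inter lst2 lst1 [] []]
  simp only [List.nil_append]
  refine Prod.ext rfl ?_
  rw [pvDf_append lst1 lst2 [], List.nil_append, List.filter_append]
  have hfst : (pvDf [] lst1).filter (fun x => decide (x ∈ lst1) && decide (x ∈ PySem.Set.ofList lst2))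
      = (pvDf [] lst1).filter (fun x => decide (x ∈ lst2)) := by
    apply List.filter_congr
    intro x hx
    have hx1 : x ∈ lst1 := ((pvMem_df [] lst1 x).mp hx).1
    simp [hx1, PySem.Set.mem_ofList]
  have hsnd : (pvDf (pvDf [] lst1) lst2).filter
      (fun x => decide (x ∈ lst1) && decide (x ∈ PySem.Set.ofList lst2)) = [] := by
    rw [List.filter_eq_nil_iff]
    intro x hx
    have hxn : x ∉ pvDf [] lst1 := ((pvMem_df (pvDf [] lst1) lst2 x).mp hx).2
    have hx1 : x ∉ lst1 := fun h => hxn ((pvMem_df [] lst1 x).mpr ⟨h, by simp⟩)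
    simp [hx1]
  rw [hfst, hsnd, List.append_nil]

-- ===== VERDICT (by name: the statement is the Claim_ definition above) =====
theorem union_and_intersection_spec : Claim_equal_union_and_intersection := by
  intro lst1 lst2 _
  exact union_and_intersection_eq lst1 lst2
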